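-- pv_equiv track=rewrite | github.com/NVIDIA-NeMo/RL | nemo_rl/environments/rewards.py | extract_all_boxed
-- ===== SOURCE A (Python) =====
-- def extract_all_boxed(text: str) -> list[str]:
--     if "\\boxed{" not in text:
--         return []
--     results = []
--     # require that boxed can't be nested
--     parts = text.split("\\boxed{")[1:]
--     for part in parts:
--         depth = 1
--         for i, char in enumerate(part):
--             if char == "{":
--                 depth += 1
--             elif char == "}":
--                 depth -= 1
--             if depth == 0:
--                 results.append(part[:i])
--                 break
--         # if parens are not balanced, the answer is ignored
--     return results
-- ===== SOURCE B (Python) =====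
-- def extract_all_boxed(text: str) -> list[str]:
--     results = []
--     buf = None   # active capture buffer, or None when not inside a \boxed{...}
--     depth = 0
--     i = 0
--     n = len(text)
--     while i < n:
--         if text.startswith("\\boxed{", i):
--             # (re)start a capture; an unfinished capture is discarded
--             buf = []
--             depth = 1
--             i += 7
--         elif buf is None:
--             i += 1
--         else:
--             c = text[i]
--             if c == "{":
--                 depth += 1
--             elif c == "}":
--                 depth -= 1
--             if depth == 0:
--                 results.append("".join(buf))
--                 buf = None
--             else:
--                 buf.append(c)
--             i += 1
--     return results
-- ===== Notes on version B (the rewrite author's own statement) =====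
-- stated objective: alternative
-- what changed: A splits the text on the boxed marker and re-scans each fragment with a fresh depth counter; B makes one left-to-right pass over the text with an (inactive | active depth+buffer) state, (re)starting a capture at each marker and emitting the buffer when the brace depth returns to zero.
import Mathlib
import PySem

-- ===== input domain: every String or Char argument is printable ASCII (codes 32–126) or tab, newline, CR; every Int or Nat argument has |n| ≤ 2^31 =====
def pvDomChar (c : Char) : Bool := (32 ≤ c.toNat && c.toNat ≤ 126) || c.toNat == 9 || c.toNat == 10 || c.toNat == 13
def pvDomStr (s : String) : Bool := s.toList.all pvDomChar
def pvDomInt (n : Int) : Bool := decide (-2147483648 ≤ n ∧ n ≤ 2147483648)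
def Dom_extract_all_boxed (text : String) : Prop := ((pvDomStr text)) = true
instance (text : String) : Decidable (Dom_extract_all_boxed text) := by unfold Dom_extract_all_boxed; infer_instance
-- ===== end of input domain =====

-- B replaces A's split-then-rescan decomposition by one left-to-right scan with an
-- (inactive | active depth+buffer) state: a different decomposition, same exact results.

-- ===== PORT A =====
-- the inner 'for i, char in enumerate(part)' loop; part[:i] with i ≥ 0 is List.take i (exact here)
def pvBoxLoopA : List Char → Int → Nat → List Char → Option (List Char)
  | [], _, _, _ => none
  | c :: rest, depth, i, part =>
      let d := if c = '{' then depth + 1 else if c = '}' then depth - 1 else depth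
      if d = 0 then some (part.take i) else pvBoxLoopA rest d (i + 1) part

def extract_all_boxed (text : String) : List String :=
  if PySem.Str.isIn "\\boxed{" text = false then []
  else
    -- text.split("\\boxed{")[1:]  (the separator is non-empty, so split? is always `some`)
    let parts := PySem.List.slice ((PySem.Str.split? text "\\boxed{").getD []) (some 1) none
    parts.foldl (fun results part =>
      match pvBoxLoopA part.toList 1 0 part.toList with
      | some r => results ++ [String.ofList r]
      | none => results) []

-- ===== PORT B =====
def pvBox : List Char := ['\\', 'b', 'o', 'x', 'e', 'd', '{']

-- Source B's while-loop: l is the remaining suffix of the text, st the optional (depth, buffer) state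
def pvBoxLoopB (l : List Char) (st : Option (Int × List Char)) : List (List Char) :=
  if h : pvBox.isPrefixOf l then pvBoxLoopB (l.drop 7) (some (1, []))
  else match l, st with
    | [], _ => []
    | _ :: rest, none => pvBoxLoopB rest none
    | c :: rest, some (d, buf) =>
      let d' := if c = '{' then d + 1 else if c = '}' then d - 1 else d
      if d' = 0 then buf :: pvBoxLoopB rest none
      else pvBoxLoopB rest (some (d', buf ++ [c]))
termination_by l.length
decreasing_by
  · have hle : pvBox.length ≤ l.length := (List.isPrefixOf_iff_prefix.mp h).length_le
    simp [pvBox] at hle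
    simp
    omega
  · simp
  · simp
  · simp

def extract_all_boxed_alt (text : String) : List String :=
  (pvBoxLoopB text.toList none).map String.ofList

-- ===== PRECONDITION & SPEC =====
def Spec_extract_all_boxed (text : String) (out : List String) : Prop := out = extract_all_boxed_alt text
instance (text : String) (out : List String) : Decidable (Spec_extract_all_boxed text out) := by unfold Spec_extract_all_boxed; infer_instance

-- ===== CLAIM (what is proved, stated in full; the proofs are below) =====
def Claim_equal_extract_all_boxed : Prop := ∀ (text : String), Dom_extract_all_boxed text → Spec_extract_all_boxed text (extract_all_boxed text)

-- ===== LEMMAS AND PROOFS =====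

-- scan of ONE split part at depth d: the captured chars (up to the closing brace), or none
def pvH : List Char → Int → Option (List Char)
  | [], _ => none
  | c :: rest, d =>
      let d' := if c = '{' then d + 1 else if c = '}' then d - 1 else d
      if d' = 0 then some [] else (pvH rest d').map (c :: ·)

-- structural reformulation of text.split("\boxed{")
def pvSplit (l : List Char) : List (List Char) :=
  if h : pvBox.isPrefixOf l then [] :: pvSplit (l.drop 7)
  else match l with
    | [] => [[]]
    | c :: rest => (pvSplit rest).modifyHead (c :: ·)
termination_by l.length
decreasing_by
  · have hle : pvBox.length ≤ l.length := (List.isPrefixOf_iff_prefix.mp h).length_le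
    simp [pvBox] at hle
    simp
    omega
  · simp

-- what A computes, at the List Char level
def pvR (l : List Char) : List (List Char) :=
  ((pvSplit l).drop 1).filterMap (fun p => pvH p 1)

theorem pvSplit_nil : pvSplit [] = [[]] := by
  rw [pvSplit]; rfl

theorem pvSplit_box (l : List Char) (h : pvBox.isPrefixOf l = true) :
    pvSplit l = [] :: pvSplit (l.drop 7) := by
  rw [pvSplit]; simp [h]

theorem pvSplit_cons (c : Char) (rest : List Char) (h : pvBox.isPrefixOf (c :: rest) = false) :
    pvSplit (c :: rest) = (pvSplit rest).modifyHead (c :: ·) := by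
  rw [pvSplit]; simp [h]

theorem pvLoopB_nil (st : Option (Int × List Char)) : pvBoxLoopB [] st = [] := by
  rw [pvBoxLoopB]; rfl

theorem pvLoopB_box (l : List Char) (st : Option (Int × List Char))
    (h : pvBox.isPrefixOf l = true) :
    pvBoxLoopB l st = pvBoxLoopB (l.drop 7) (some (1, [])) := by
  rw [pvBoxLoopB]; simp [h]

theorem pvLoopB_cons_none (c : Char) (rest : List Char)
    (h : pvBox.isPrefixOf (c :: rest) = false) :
    pvBoxLoopB (c :: rest) none = pvBoxLoopB rest none := by
  rw [pvBoxLoopB]; simp [h]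

theorem pvLoopB_cons_some (c : Char) (rest : List Char) (d : Int) (buf : List Char)
    (h : pvBox.isPrefixOf (c :: rest) = false) :
    pvBoxLoopB (c :: rest) (some (d, buf)) =
      (let d' := if c = '{' then d + 1 else if c = '}' then d - 1 else d;
       if d' = 0 then buf :: pvBoxLoopB rest none
       else pvBoxLoopB rest (some (d', buf ++ [c]))) := by
  rw [pvBoxLoopB]; simp [h]

theorem pvSplit_ne_nil_aux : ∀ (n : Nat) (l : List Char), l.length ≤ n → pvSplit l ≠ [] := by
  intro n
  induction n with
  | zero =>
      intro l hl
      cases l with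
      | nil => rw [pvSplit_nil]; simp
      | cons c rest => simp at hl
  | succ n ih =>
      intro l hl
      by_cases hp : pvBox.isPrefixOf l
      · rw [pvSplit_box l hp]; simp
      · cases l with
        | nil => rw [pvSplit_nil]; simp
        | cons c rest =>
            rw [pvSplit_cons c rest (Bool.eq_false_iff.mpr hp)]
            have h2 := ih rest (by simp at hl; omega)
            intro hcontra
            have hlen : (pvSplit rest).length = 0 := by
              have := congrArg List.length hcontra
              simpa [List.length_modifyHead] using this
            exact h2 (List.eq_nil_of_length_eq_zero hlen)

theorem pvSplit_ne_nil (l : List Char) : pvSplit l ≠ [] :=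
  pvSplit_ne_nil_aux l.length l le_rfl

theorem pvSplit_exists_cons (l : List Char) : ∃ p0 ps, pvSplit l = p0 :: ps := by
  cases hq : pvSplit l with
  | nil => exact absurd hq (pvSplit_ne_nil l)
  | cons a t => exact ⟨a, t, rfl⟩

theorem pvGoSpec : ∀ (fuel : Nat) (l cur : List Char) (acc : List (List Char)),
    l.length < fuel →
    PySem.Chars.splitOn.go pvBox fuel l cur acc
      = acc.reverse ++ (pvSplit l).modifyHead (cur.reverse ++ ·) := by
  intro fuel
  induction fuel with
  | zero => intro l cur acc h; omega
  | succ fuel ih =>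
      intro l cur acc h
      cases l with
      | nil =>
          rw [show PySem.Chars.splitOn.go pvBox (fuel+1) [] cur acc
                = (cur.reverse :: acc).reverse from rfl]
          rw [pvSplit_nil]
          simp [List.modifyHead]
      | cons c rest =>
          rw [show PySem.Chars.splitOn.go pvBox (fuel+1) (c::rest) cur acc
                = if pvBox.isPrefixOf (c::rest) then
                    PySem.Chars.splitOn.go pvBox fuel (List.drop pvBox.length (c::rest)) [] (cur.reverse :: acc)
                  else PySem.Chars.splitOn.go pvBox fuel rest (c::cur) acc from rfl]
          by_cases hp : pvBox.isPrefixOf (c::rest)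
          · rw [if_pos hp]
            have hlen : (List.drop pvBox.length (c::rest)).length < fuel := by
              simp [pvBox] at h ⊢; omega
            rw [ih _ [] _ hlen]
            rw [pvSplit_box _ hp]
            have hid : (fun x : List Char => ([] : List Char).reverse ++ x) = id := by
              funext x; simp
            rw [hid, List.modifyHead_id]
            have hdrop : List.drop pvBox.length (c :: rest) = List.drop 7 (c :: rest) := rfl
            rw [hdrop]
            simp [List.modifyHead]
          · rw [if_neg hp]
            rw [ih _ _ _ (by simp at h ⊢; omega)]
            rw [pvSplit_cons c rest (Bool.eq_false_iff.mpr hp)]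
            have hcomp : (fun x : List Char => (c :: cur).reverse ++ x)
                = ((fun x : List Char => cur.reverse ++ x) ∘ (fun x : List Char => c :: x)) := by
              funext x; simp
            rw [List.modifyHead_modifyHead, ← hcomp]

theorem pvSplitOn_eq (l : List Char) : PySem.Chars.splitOn l pvBox = pvSplit l := by
  have := pvGoSpec (l.length + 1) l [] [] (by omega)
  rw [PySem.Chars.splitOn] at *
  rw [this]
  have hid : (fun x : List Char => ([] : List Char).reverse ++ x) = id := by
    funext x; simp
  rw [hid, List.modifyHead_id]
  simp

theorem pvNoBox_split_aux : ∀ (n : Nat) (l : List Char), l.length ≤ n →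
    ¬ pvBox <:+: l → pvSplit l = [l] := by
  intro n
  induction n with
  | zero =>
      intro l hl _
      cases l with
      | nil => exact pvSplit_nil
      | cons c rest => simp at hl
  | succ n ih =>
      intro l hl hninf
      by_cases hp : pvBox.isPrefixOf l
      · exact absurd (List.isPrefixOf_iff_prefix.mp hp).isInfix hninf
      · cases l with
        | nil => exact pvSplit_nil
        | cons c rest =>
            rw [pvSplit_cons c rest (Bool.eq_false_iff.mpr hp)]
            have hrest : ¬ pvBox <:+: rest := fun h2 =>
              hninf (h2.trans (List.suffix_cons c rest).isInfix)
            rw [ih rest (by simp at hl; omega) hrest]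
            simp [List.modifyHead]

theorem pvNoBox_split (l : List Char) (h : ¬ pvBox <:+: l) : pvSplit l = [l] :=
  pvNoBox_split_aux l.length l le_rfl h

theorem pvLoopA_eq_H : ∀ (l : List Char) (d : Int) (acc : List Char),
    pvBoxLoopA l d acc.length (acc ++ l) = (pvH l d).map (acc ++ ·) := by
  intro l
  induction l with
  | nil => intro d acc; simp [pvBoxLoopA, pvH]
  | cons c rest ih =>
      intro d acc
      by_cases h0 : (if c = '{' then d + 1 else if c = '}' then d - 1 else d) = 0
      · simp only [pvBoxLoopA, pvH, h0, if_pos]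
        simp
      · simp only [pvBoxLoopA, pvH]
        rw [if_neg h0, if_neg h0]
        have h1 : acc.length + 1 = (acc ++ [c]).length := by simp
        have h2 : acc ++ c :: rest = (acc ++ [c]) ++ rest := by simp
        rw [h1, h2, ih _ (acc ++ [c])]
        cases pvH rest (if c = '{' then d + 1 else if c = '}' then d - 1 else d) with
        | none => simp
        | some r => simp

theorem pvLoopA_eq_H' (l : List Char) (d : Int) :
    pvBoxLoopA l d 0 l = pvH l d := by
  have := pvLoopA_eq_H l d []
  simpa using this

theorem pvLoopB_spec : ∀ (n : Nat) (l : List Char), l.length ≤ n →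
    (pvBoxLoopB l none = pvR l) ∧
    (∀ (d : Int) (buf : List Char), pvBoxLoopB l (some (d, buf)) =
      match pvH ((pvSplit l).headI) d with
      | some r => (buf ++ r) :: pvR l
      | none => pvR l) := by
  intro n
  induction n with
  | zero =>
      intro l hl
      cases l with
      | cons c rest => simp at hl
      | nil =>
          refine ⟨by rw [pvLoopB_nil]; simp [pvR, pvSplit_nil], ?_⟩
          intro d buf
          rw [pvLoopB_nil]
          simp [pvR, pvSplit_nil, pvH]
  | succ n ih =>
      intro l hl
      by_cases hp : pvBox.isPrefixOf l
      · have h7 : 7 ≤ l.length := by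
          have := (List.isPrefixOf_iff_prefix.mp hp).length_le
          simpa [pvBox] using this
        have IH := ih (l.drop 7) (by simp; omega)
        obtain ⟨p0, ps, hps⟩ := pvSplit_exists_cons (l.drop 7)
        have hsplit : pvSplit l = [] :: pvSplit (l.drop 7) := pvSplit_box l hp
        have hval : pvBoxLoopB (l.drop 7) (some (1, [])) = pvR l := by
          rw [IH.2 1 []]
          rw [hps]
          simp only [pvR, hsplit, hps, List.drop_succ_cons, List.drop_zero,
            List.filterMap_cons, List.headI]
          cases pvH p0 1 with
          | none => simp
          | some r => simp
        refine ⟨by rw [pvLoopB_box l none hp, hval], ?_⟩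
        intro d buf
        rw [pvLoopB_box l _ hp, hval, hsplit]
        simp [pvH]
      · cases l with
        | nil =>
            refine ⟨by rw [pvLoopB_nil]; simp [pvR, pvSplit_nil], ?_⟩
            intro d buf
            rw [pvLoopB_nil]
            simp [pvR, pvSplit_nil, pvH]
        | cons c rest =>
            have hpf : pvBox.isPrefixOf (c :: rest) = false := Bool.eq_false_iff.mpr hp
            have IH := ih rest (by simp at hl; omega)
            obtain ⟨p0, ps, hps⟩ := pvSplit_exists_cons rest
            have hsplit : pvSplit (c :: rest) = (c :: p0) :: ps := by
              rw [pvSplit_cons c rest hpf, hps]; rfl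
            have hR : pvR (c :: rest) = pvR rest := by
              simp [pvR, hsplit, hps]
            refine ⟨by rw [pvLoopB_cons_none c rest hpf, IH.1, hR], ?_⟩
            intro d buf
            rw [pvLoopB_cons_some c rest d buf hpf]
            simp only [hsplit, List.headI]
            by_cases h0 : (if c = '{' then d + 1 else if c = '}' then d - 1 else d) = 0
            · simp only [h0, if_pos, pvH]
              rw [IH.1, hR]
              simp
            · simp only [pvH]
              rw [if_neg h0, if_neg h0]
              rw [IH.2 _ (buf ++ [c])]
              rw [hps]
              simp only [List.headI]
              cases pvH p0 (if c = '{' then d + 1 else if c = '}' then d - 1 else d) with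
              | none => simp [hR]
              | some r => simp [hR]

theorem pvFoldA : ∀ (ps : List (List Char)) (acc : List String),
    (ps.map String.ofList).foldl (fun results part =>
      match pvBoxLoopA part.toList 1 0 part.toList with
      | some r => results ++ [String.ofList r]
      | none => results) acc
    = acc ++ (ps.filterMap (fun p => pvH p 1)).map String.ofList := by
  intro ps
  induction ps with
  | nil => intro acc; simp
  | cons p rest ih =>
      intro acc
      simp only [List.map_cons, List.foldl_cons, List.filterMap_cons]
      rw [show (String.ofList p).toList = p from String.toList_ofList]
      rw [pvLoopA_eq_H' p 1]
      cases pvH p 1 with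
      | none => rw [ih]
      | some r => rw [ih]; simp

-- ===== VERDICT (by name: the statement is the Claim_ definition above) =====
theorem extract_all_boxed_spec : Claim_equal_extract_all_boxed := by
  intro text _
  unfold Spec_extract_all_boxed
  have hbox : "\\boxed{".toList = pvBox := rfl
  have hB : pvBoxLoopB text.toList none = pvR text.toList :=
    (pvLoopB_spec text.toList.length text.toList le_rfl).1
  simp only [extract_all_boxed, extract_all_boxed_alt]
  by_cases hin : PySem.Str.isIn "\\boxed{" text = false
  · rw [if_pos hin]
    have hninf : ¬ pvBox <:+: text.toList := by
      intro hinf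
      have := (PySem.Str.isIn_iff_infix "\\boxed{" text).mpr (by rw [hbox]; exact hinf)
      rw [this] at hin; exact Bool.true_eq_false.mp hin
    rw [hB]
    simp [pvR, pvNoBox_split text.toList hninf]
  · rw [if_neg hin]
    -- split? is `some` here, and equals pvSplit
    have hchars : PySem.Chars.split? text.toList "\\boxed{".toList
        = some (pvSplit text.toList) := by
      rw [PySem.Chars.split?]
      rw [if_neg (by rw [hbox]; simp [pvBox])]
      rw [hbox, pvSplitOn_eq]
    have hmap := PySem.Str.split?_map text "\\boxed{"
    rw [hchars] at hmap
    cases hsp : PySem.Str.split? text "\\boxed{" with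
    | none => rw [hsp] at hmap; simp at hmap
    | some ps =>
        rw [hsp] at hmap
        simp only [Option.map_some, Option.some.injEq] at hmap
        have hps : ps = (pvSplit text.toList).map String.ofList := by
          calc ps = (ps.map String.toList).map String.ofList := by
                    simp [List.map_map, Function.comp_def, String.ofList_toList]
            _ = (pvSplit text.toList).map String.ofList := by rw [hmap]
        simp only [Option.getD_some]
        rw [PySem.List.slice_from ps (by norm_num)]
        have h1 : ((1 : Int)).toNat = 1 := rfl
        rw [h1, hps, ← List.map_drop]
        rw [pvFoldA]
        rw [hB]
        simp [pvR]
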